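-- pv_equiv track=rewrite | github.com/sheryllan/Algo | Math/valid_keys.py | get_divisor_counts
-- ===== SOURCE A (Python) =====
-- def get_divisor_counts(N: int):
--     if N < 2:
--         return [0] * N
--
--     # 0 to indicate the number is a prime number
--     divisor_cnt = [0] * (N + 1)
--
--     for x in range(2, N + 1):
--         if divisor_cnt[x] != 0:
--             continue
--
--         start = x * x
--         for i in range(start, N + 1, x):
--             divisor_cnt[i] += 1 if i == start else 2
--
--     return divisor_cnt
-- ===== SOURCE B (Python) =====
-- def get_divisor_counts(N: int):
--     if N < 2:
--         return [0] * N
--     # smallest-prime-factor table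
--     spf = [0] * (N + 1)
--     for i in range(2, N + 1):
--         if spf[i] == 0:
--             for j in range(i, N + 1, i):
--                 if spf[j] == 0:
--                     spf[j] = i
--     # DP: omega[n] = number of distinct prime factors, big[n] = largest prime factor
--     omega = [0] * (N + 1)
--     big = [0] * (N + 1)
--     res = [0] * (N + 1)
--     for n in range(2, N + 1):
--         p = spf[n]
--         m = n // p
--         om = omega[m] + (0 if spf[m] == p else 1)
--         omega[n] = om
--         bg = big[m] if m > 1 else p
--         big[n] = bg
--         res[n] = 2 * om - (2 if bg * bg > n else (1 if bg * bg == n else 0))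
--     return res
-- ===== Notes on version B (the rewrite author's own statement) =====
-- stated objective: alternative
-- what changed: A marks every multiple of each prime in a shared count table (adding 1 at p*p, 2 beyond); B instead builds a smallest-prime-factor sieve and then computes each entry in O(1) by dynamic programming on n//spf[n] (distinct-prime-factor count and largest prime factor), using that only the largest prime factor can have p*p >= n.
import Mathlib
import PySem

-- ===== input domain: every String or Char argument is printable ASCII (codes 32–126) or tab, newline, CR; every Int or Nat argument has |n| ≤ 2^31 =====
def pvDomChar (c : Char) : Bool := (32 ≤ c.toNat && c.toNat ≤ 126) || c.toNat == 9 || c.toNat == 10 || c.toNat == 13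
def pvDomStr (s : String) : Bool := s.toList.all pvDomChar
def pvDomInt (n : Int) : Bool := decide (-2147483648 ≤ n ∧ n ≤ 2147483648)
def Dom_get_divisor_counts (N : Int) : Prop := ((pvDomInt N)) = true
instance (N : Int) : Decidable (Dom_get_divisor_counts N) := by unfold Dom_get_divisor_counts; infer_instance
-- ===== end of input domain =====

-- B replaces A's prime-marking count sieve by a smallest-prime-factor sieve plus an O(1)-per-number
-- dynamic program (distinct-prime-factor count and largest prime factor), same return value (objective: alternative).

-- ===== PORT A =====
-- body of A's outer loop (the `for x in range(2, N+1)` body, with its inner marking loop)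
def pvStepA (N : Int) : List Int → Int → List Int := fun dc x =>
  if PySem.List.pyGetD dc x 0 ≠ 0 then dc
  else
    (PySem.List.pyRange (x * x) (N + 1) x).foldl
      (fun dc2 i => PySem.List.pySetD dc2 i (PySem.List.pyGetD dc2 i 0 + if i = x * x then 1 else 2)) dc

def get_divisor_counts (N : Int) : List Int :=
  if N < 2 then List.replicate N.toNat 0
  else (PySem.List.pyRange 2 (N + 1)).foldl (pvStepA N) (List.replicate (N + 1).toNat 0)

-- ===== PORT B =====
-- body of B's spf-sieve outer loop (`for i in range(2, N+1)` in Source B)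
def pvStepS (N : Int) : List Int → Int → List Int := fun s i =>
  if PySem.List.pyGetD s i 0 = 0 then
    (PySem.List.pyRange i (N + 1) i).foldl
      (fun s2 j => if PySem.List.pyGetD s2 j 0 = 0 then PySem.List.pySetD s2 j i else s2) s
  else s

-- body of B's DP loop (`for n in range(2, N+1)` in Source B); state = (omega, big, res)
def pvStepT (spf : List Int) : List Int × List Int × List Int → Int → List Int × List Int × List Int :=
  fun t n =>
    let omega := t.1
    let big := t.2.1
    let res := t.2.2
    let p := PySem.List.pyGetD spf n 0
    let m := PySem.Int.floordiv n p
    let om := PySem.List.pyGetD omega m 0 + (if PySem.List.pyGetD spf m 0 = p then 0 else 1)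
    let bg := if 1 < m then PySem.List.pyGetD big m 0 else p
    let r := 2 * om - (if n < bg * bg then 2 else if bg * bg = n then 1 else 0)
    (PySem.List.pySetD omega n om, PySem.List.pySetD big n bg, PySem.List.pySetD res n r)

def get_divisor_counts_alt (N : Int) : List Int :=
  if N < 2 then List.replicate N.toNat 0
  else
    let spf := (PySem.List.pyRange 2 (N + 1)).foldl (pvStepS N) (List.replicate (N + 1).toNat 0)
    let t := (PySem.List.pyRange 2 (N + 1)).foldl (pvStepT spf)
      (List.replicate (N + 1).toNat 0, List.replicate (N + 1).toNat 0, List.replicate (N + 1).toNat 0)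
    t.2.2

-- ===== PRECONDITION & SPEC =====
def Spec_get_divisor_counts (N : Int) (out : List Int) : Prop := out = get_divisor_counts_alt N
instance (N : Int) (out : List Int) : Decidable (Spec_get_divisor_counts N out) := by unfold Spec_get_divisor_counts; infer_instance

-- ===== CLAIM (what is proved, stated in full; the proofs are below) =====
def Claim_equal_get_divisor_counts : Prop := ∀ (N : Int), Dom_get_divisor_counts N → Spec_get_divisor_counts N (get_divisor_counts N)

-- ===== LEMMAS AND PROOFS =====

-- the mathematical value both programs compute at index n:
-- for each distinct prime factor p of n, add 2 if p*p < n, 1 if p*p = n, 0 if p*p > n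
def pvContrib (p n : ℕ) : Int := if p * p < n then 2 else if p * p = n then 1 else 0
def pvF (n : ℕ) : Int := ∑ p ∈ n.primeFactors, pvContrib p n
-- A's table after the outer loop has processed x = 2 .. k-1
def pvG (k j : ℕ) : Int :=
  ∑ p ∈ (Finset.range k).filter (fun p => p.Prime ∧ p ∣ j ∧ p * p ≤ j), (if j = p * p then (1 : Int) else 2)
def pvOmega (n : ℕ) : ℕ := n.primeFactors.card
def pvBig (n : ℕ) : ℕ := n.primeFactors.sup id

-- generic: a fold over a Nodup index list whose body touches only cell i (as U i) acts pointwise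
lemma pv_foldl_cellwise (body : List Int → Int → List Int) (U : Int → Int → Int)
    (hlen : ∀ L i, (body L i).length = L.length)
    (hcell : ∀ (L : List Int) (i : Int), 0 ≤ i → i < (L.length : Int) →
        ∀ j : ℕ, j < L.length →
          PySem.List.pyGetD (body L i) (j : Int) 0 =
            if (j : Int) = i then U i (PySem.List.pyGetD L (j : Int) 0)
            else PySem.List.pyGetD L (j : Int) 0) :
    ∀ (idx : List Int), idx.Nodup →
      ∀ L : List Int, (∀ i ∈ idx, 0 ≤ i ∧ i < (L.length : Int)) →
        (idx.foldl body L).length = L.length ∧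
        ∀ j : ℕ, j < L.length →
          PySem.List.pyGetD (idx.foldl body L) (j : Int) 0 =
            if (j : Int) ∈ idx then U (j : Int) (PySem.List.pyGetD L (j : Int) 0)
            else PySem.List.pyGetD L (j : Int) 0 := by
  intro idx
  induction idx with
  | nil => intro _ L _; exact ⟨rfl, by intro j hj; simp⟩
  | cons i tl ih =>
    intro hnd L hin
    have hi := hin i (List.mem_cons_self ..)
    have hlen' : (body L i).length = L.length := hlen L i
    have htl := ih (List.nodup_cons.mp hnd).2 (body L i)
      (by intro x hx; rw [hlen']; exact hin x (List.mem_cons_of_mem _ hx))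
    refine ⟨by simpa [hlen'] using htl.1, ?_⟩
    intro j hj
    have h2 := htl.2 j (by rw [hlen']; exact hj)
    simp only [List.foldl_cons] at h2 ⊢
    rw [h2, hcell L i hi.1 hi.2 j hj]
    by_cases hji : (j : Int) = i
    · have hnin : (j : Int) ∉ tl := by rw [hji]; exact (List.nodup_cons.mp hnd).1
      rw [hji] at hnin
      simp [hji, hnin]
    · by_cases hjm : (j : Int) ∈ tl <;> simp [hji, hjm, List.mem_cons]

lemma pv_nodup_pyRange_pos (a b s : Int) (hs : 0 < s) : (PySem.List.pyRange a b s).Nodup := by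
  rw [PySem.List.pyRange_of_pos a b hs]
  refine List.Nodup.map ?_ List.nodup_range
  intro x y hxy
  have h1 : s * (x : Int) = s * (y : Int) := by linarith
  have h2 : (x : Int) = (y : Int) := mul_left_cancel₀ (ne_of_gt hs) h1
  exact_mod_cast h2


lemma pvG_two (j : ℕ) : pvG 2 j = 0 := by
  unfold pvG
  rw [Finset.filter_eq_empty_iff.mpr, Finset.sum_empty]
  intro p hp
  simp only [Finset.mem_range] at hp
  rintro ⟨hpp, -⟩
  have := hpp.two_le
  omega

lemma pvG_succ_notprime (k j : ℕ) (h : ¬ k.Prime) : pvG (k+1) j = pvG k j := by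
  unfold pvG
  rw [Finset.range_add_one, Finset.filter_insert, if_neg]
  rintro ⟨hp, -⟩
  exact h hp

lemma pvG_succ_prime (k j : ℕ) (h : k.Prime) : pvG (k+1) j =
    pvG k j + (if k ∣ j ∧ k * k ≤ j then (if j = k * k then (1:Int) else 2) else 0) := by
  unfold pvG
  rw [Finset.range_add_one, Finset.filter_insert]
  by_cases hc : k ∣ j ∧ k * k ≤ j
  · rw [if_pos ⟨h, hc.1, hc.2⟩, if_pos hc,
      Finset.sum_insert (by simp [Finset.mem_filter, Finset.mem_range])]
    ring
  · rw [if_neg (by rintro ⟨-, h1, h2⟩; exact hc ⟨h1, h2⟩), if_neg hc, add_zero]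

lemma pvG_self_prime (k : ℕ) (h : k.Prime) : pvG k k = 0 := by
  unfold pvG
  rw [Finset.filter_eq_empty_iff.mpr, Finset.sum_empty]
  intro p hp
  simp only [Finset.mem_range] at hp
  rintro ⟨hpp, hdvd, -⟩
  have h2 := hpp.two_le
  rcases (Nat.Prime.eq_one_or_self_of_dvd h p hdvd) with h1 | h1 <;> omega

lemma pvG_self_comp_pos (k : ℕ) (h2 : 2 ≤ k) (h : ¬ k.Prime) : 0 < pvG k k := by
  unfold pvG
  apply Finset.sum_pos
  · intro i _
    split <;> norm_num
  · refine ⟨k.minFac, ?_⟩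
    have hpf := Nat.minFac_prime (by omega : k ≠ 1)
    have hdvd := Nat.minFac_dvd k
    have hsq : k.minFac ^ 2 ≤ k := Nat.minFac_sq_le_self (by omega) h
    rw [pow_two] at hsq
    have hlt : k.minFac < k := by
      have hle := Nat.le_of_dvd (by omega) hdvd
      rcases lt_or_eq_of_le hle with h' | h'
      · exact h'
      · exact absurd (Nat.prime_def_minFac.mpr ⟨h2, h'⟩) h
    simp only [Finset.mem_filter, Finset.mem_range]
    exact ⟨hlt, hpf, hdvd, hsq⟩

lemma pv_eq_map_range (X : List Int) (M : ℕ) (f : ℕ → Int) (hlen : X.length = M + 1)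
    (h : ∀ j : ℕ, j < M + 1 → PySem.List.pyGetD X (j:Int) 0 = f j) :
    X = (List.range (M+1)).map f := by
  apply List.ext_getElem (by simp [hlen])
  intro i h1 h2
  have hh := h i (by omega)
  rw [PySem.List.pyGetD_natCast, List.getD_eq_getElem _ _ (by omega)] at hh
  simpa using hh

lemma pvA_inner (M p : ℕ) (hp : 2 ≤ p) (L : List Int) (hL : L.length = M + 1) :
    ((PySem.List.pyRange ((p:Int) * p) ((M:Int) + 1) p).foldl
        (fun dc2 i => PySem.List.pySetD dc2 i (PySem.List.pyGetD dc2 i 0 + if i = (p:Int) * p then 1 else 2)) L).length = M + 1 ∧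
    ∀ j : ℕ, j < M + 1 →
      PySem.List.pyGetD ((PySem.List.pyRange ((p:Int) * p) ((M:Int) + 1) p).foldl
        (fun dc2 i => PySem.List.pySetD dc2 i (PySem.List.pyGetD dc2 i 0 + if i = (p:Int) * p then 1 else 2)) L) (j:Int) 0 =
      PySem.List.pyGetD L (j:Int) 0 + (if p ∣ j ∧ p * p ≤ j then (if j = p * p then (1:Int) else 2) else 0) := by
  have hs : (0:Int) < (p:Int) := by exact_mod_cast (by omega : 0 < p)
  have hres := pv_foldl_cellwise
    (fun dc2 i => PySem.List.pySetD dc2 i (PySem.List.pyGetD dc2 i 0 + if i = (p:Int) * p then 1 else 2))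
    (fun i a => a + if i = (p:Int) * p then 1 else 2)
    (fun L' i => PySem.List.length_pySetD L' i _)
    (by
      intro L' i h0 hlt j hj
      obtain ⟨n, rfl⟩ : ∃ n : ℕ, i = (n:Int) := ⟨i.toNat, (Int.toNat_of_nonneg h0).symm⟩
      have hn : n < L'.length := by exact_mod_cast hlt
      rw [PySem.List.pyGetD_pySetD_natCast _ n j _ _ hn]
      by_cases hjn : j = n
      · simp [hjn]
      · have hji : (j:Int) ≠ (n:Int) := by exact_mod_cast hjn
        simp [hjn, hji])
    (PySem.List.pyRange ((p:Int) * p) ((M:Int) + 1) p)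
    (pv_nodup_pyRange_pos _ _ _ hs) L
    (by
      intro i hi
      rw [PySem.List.mem_pyRange_iff_of_pos hs] at hi
      constructor
      · have : (0:Int) ≤ (p:Int) * p := by positivity
        omega
      · obtain ⟨-, h2', -⟩ := hi
        rw [hL]; push_cast; omega)
  obtain ⟨hlen, hpt⟩ := hres
  refine ⟨by rw [hlen, hL], ?_⟩
  intro j hj
  rw [hpt j (by omega)]
  have hmem : ((j:Int) ∈ PySem.List.pyRange ((p:Int) * p) ((M:Int) + 1) p) ↔ (p ∣ j ∧ p * p ≤ j) := by
    rw [PySem.List.mem_pyRange_iff_of_pos hs]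
    constructor
    · rintro ⟨h1, -, h3⟩
      have h4 : (p:Int) ∣ (j:Int) := by
        have := dvd_add h3 (dvd_mul_right (p:Int) p)
        simpa using this
      exact ⟨by exact_mod_cast h4, by exact_mod_cast h1⟩
    · rintro ⟨h1, h2⟩
      refine ⟨by exact_mod_cast h2, by omega, ?_⟩
      exact dvd_sub (by exact_mod_cast h1) (dvd_mul_right _ _)
  have hcast : ((j:Int) = (p:Int) * p) ↔ j = p * p := by
    constructor <;> intro h <;> exact_mod_cast h
  by_cases hc : p ∣ j ∧ p * p ≤ j
  · rw [if_pos (hmem.mpr hc), if_pos hc]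
    simp only [hcast]
  · rw [if_neg (fun h => hc (hmem.mp h)), if_neg hc, add_zero]

lemma pvA_loop (M : ℕ) (k : ℕ) (h2 : 2 ≤ k) (hk : k ≤ M + 1) :
    (PySem.List.pyRange 2 ((k:ℕ) : Int)).foldl (pvStepA (M : Int)) (List.replicate (M + 1) (0:Int)) =
      (List.range (M + 1)).map (fun j => pvG k j) := by
  induction k, h2 using Nat.le_induction with
  | base =>
    rw [show (((2:ℕ):ℕ) : Int) = 2 by norm_num, PySem.List.pyRange_one_eq_nil le_rfl]
    simp only [List.foldl_nil]
    apply List.ext_getElem (by simp)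
    intro i h1' h2'
    simp [pvG_two]
  | succ k hk2 ih =>
    have hkM : k ≤ M := by omega
    have hcast : (((k+1:ℕ)) : Int) = ((k:ℕ):Int) + 1 := by push_cast; ring
    rw [hcast, PySem.List.pyRange_one_succ_right (by exact_mod_cast hk2 : (2:Int) ≤ ((k:ℕ):Int)),
      List.foldl_append, ih (by omega)]
    simp only [List.foldl_cons, List.foldl_nil]
    have hguard : PySem.List.pyGetD ((List.range (M + 1)).map (fun j => pvG k j)) ((k:ℕ):Int) 0 = pvG k k := by
      rw [PySem.List.pyGetD_natCast, PySem.List.getD_map_range _ _ _ _ (by omega)]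
    by_cases hkp : k.Prime
    · -- x = k is prime: guard sees 0 and the inner marking loop runs
      unfold pvStepA
      rw [hguard, pvG_self_prime k hkp]
      rw [if_neg (by simp)]
      have hinner := pvA_inner M k hkp.two_le ((List.range (M + 1)).map (fun j => pvG k j)) (by simp)
      apply pv_eq_map_range _ M _ hinner.1
      intro j hj
      rw [hinner.2 j hj, PySem.List.pyGetD_natCast, PySem.List.getD_map_range _ _ _ _ (by omega),
        pvG_succ_prime k j hkp]
    · -- x = k is composite: its cell is already nonzero, the loop skips it
      unfold pvStepA
      rw [hguard, if_pos (ne_of_gt (pvG_self_comp_pos k hk2 hkp))]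
      apply List.map_congr_left
      intro a _
      exact (pvG_succ_notprime k a hkp).symm

lemma pvF_contrib_of_le (p j : ℕ) (h : p * p ≤ j) : pvContrib p j = if j = p * p then (1:Int) else 2 := by
  unfold pvContrib
  rcases lt_or_eq_of_le h with h' | h'
  · rw [if_pos h', if_neg (by omega)]
  · rw [if_neg (by omega), if_pos h', if_pos (by omega)]

lemma pvG_final (M j : ℕ) (hj : j < M + 1) : pvG (M+1) j = pvF j := by
  rcases Nat.eq_zero_or_pos j with rfl | hj0
  · unfold pvG pvF
    rw [Finset.filter_eq_empty_iff.mpr, Finset.sum_empty]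
    · simp
    · rintro p hp ⟨hpp, -, hsq⟩
      have := hpp.two_le
      nlinarith
  · unfold pvG pvF
    have hset : (Finset.range (M+1)).filter (fun p => p.Prime ∧ p ∣ j ∧ p * p ≤ j)
        = j.primeFactors.filter (fun p => p * p ≤ j) := by
      ext p
      simp only [Finset.mem_filter, Finset.mem_range, Nat.mem_primeFactors]
      constructor
      · rintro ⟨h1, h2, h3, h4⟩
        exact ⟨⟨h2, h3, by omega⟩, h4⟩
      · rintro ⟨⟨h1, h2, h3⟩, h4⟩
        have := Nat.le_of_dvd (by omega) h2
        exact ⟨by omega, h1, h2, h4⟩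
    rw [hset]
    rw [← Finset.sum_filter_add_sum_filter_not j.primeFactors (fun p => p * p ≤ j) (fun p => pvContrib p j)]
    have hz : ∑ p ∈ j.primeFactors.filter (fun p => ¬ p * p ≤ j), pvContrib p j = 0 := by
      apply Finset.sum_eq_zero
      intro p hp
      simp only [Finset.mem_filter] at hp
      unfold pvContrib
      rw [if_neg (by omega), if_neg (by omega)]
    rw [hz, add_zero]
    apply Finset.sum_congr rfl
    intro p hp
    simp only [Finset.mem_filter] at hp
    exact (pvF_contrib_of_le p j hp.2).symm

lemma pvA_eval (M : ℕ) (hM : 2 ≤ M) :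
    get_divisor_counts ((M:ℕ) : Int) = (List.range (M+1)).map pvF := by
  unfold get_divisor_counts
  rw [if_neg (by omega)]
  have h1 : (((M:ℕ):Int) + 1) = (((M+1:ℕ)) : Int) := by push_cast; ring
  have h2 : ((((M:ℕ):Int)) + 1).toNat = M + 1 := by omega
  rw [h2, h1, pvA_loop M (M+1) (by omega) le_rfl]
  apply List.map_congr_left
  intro a ha
  exact pvG_final M a (List.mem_range.mp ha)


-- ===== B-side lemmas =====

lemma pv_small_vals (j : ℕ) (hj : j < 2) : pvOmega j = 0 ∧ pvBig j = 0 ∧ pvF j = 0 := by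
  interval_cases j <;> simp [pvOmega, pvBig, pvF]

lemma pv_minFac_div_facts (k : ℕ) (h2 : 2 ≤ k) :
    1 ≤ k / k.minFac ∧ k / k.minFac < k ∧ k / k.minFac * k.minFac = k := by
  have hdvd := Nat.minFac_dvd k
  have hp2 := (Nat.minFac_prime (by omega : k ≠ 1)).two_le
  have hmul : k / k.minFac * k.minFac = k := Nat.div_mul_cancel hdvd
  have hle : k.minFac ≤ k := Nat.minFac_le (by omega)
  refine ⟨(Nat.one_le_div_iff (by omega)).mpr hle, Nat.div_lt_self (by omega) (by omega), hmul⟩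

lemma pv_minFac_quot_le (k : ℕ) (hq2 : 2 ≤ k / k.minFac) :
    k.minFac ≤ (k / k.minFac).minFac := by
  have hqd : k / k.minFac ∣ k := Nat.div_dvd_of_dvd (Nat.minFac_dvd k)
  have hdk : (k / k.minFac).minFac ∣ k := dvd_trans (Nat.minFac_dvd (k / k.minFac)) hqd
  exact Nat.minFac_le_of_dvd (Nat.minFac_prime (by omega : k / k.minFac ≠ 1)).two_le hdk

lemma pv_minFac_quot_eq (k : ℕ) (h2 : 2 ≤ k) (hq2 : 2 ≤ k / k.minFac) :
    ((k / k.minFac).minFac = k.minFac) ↔ (k.minFac ∣ k / k.minFac) := by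
  constructor
  · intro h
    have hd := Nat.minFac_dvd (k / k.minFac)
    rwa [h] at hd
  · intro h
    exact le_antisymm
      (Nat.minFac_le_of_dvd (Nat.minFac_prime (by omega : k ≠ 1)).two_le h)
      (pv_minFac_quot_le k hq2)

lemma pv_primeFactors_step (k : ℕ) (h2 : 2 ≤ k) (hq2 : 2 ≤ k / k.minFac) :
    k.primeFactors = insert k.minFac (k / k.minFac).primeFactors := by
  obtain ⟨h1, hlt, hmul⟩ := pv_minFac_div_facts k h2
  have hprime := Nat.minFac_prime (by omega : k ≠ 1)
  have hp2 := hprime.two_le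
  have hre : k.primeFactors = (k / k.minFac * k.minFac).primeFactors := by rw [hmul]
  rw [hre, Nat.primeFactors_mul (by omega : k / k.minFac ≠ 0) (by omega : k.minFac ≠ 0),
    hprime.primeFactors, Finset.union_comm, Finset.singleton_union]

lemma pv_omega_dp (k : ℕ) (h2 : 2 ≤ k) :
    (pvOmega k : Int) = (pvOmega (k / k.minFac) : Int) + (if k.minFac ∣ k / k.minFac then 0 else 1) := by
  obtain ⟨h1, hlt, hmul⟩ := pv_minFac_div_facts k h2
  have hprime := Nat.minFac_prime (by omega : k ≠ 1)
  rcases eq_or_lt_of_le h1 with hq1 | hq2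
  · -- k / minFac k = 1, i.e. k is prime
    have hk : k.minFac = k := by
      have h' := hmul
      rw [← hq1, one_mul] at h'
      exact h'
    have hkprime : k.Prime := hk ▸ hprime
    rw [← hq1, if_neg (fun hd => by have := Nat.dvd_one.mp hd; omega)]
    unfold pvOmega
    rw [Nat.primeFactors_one, hkprime.primeFactors]
    simp
  · have hq2' : 2 ≤ k / k.minFac := by omega
    unfold pvOmega
    rw [pv_primeFactors_step k h2 hq2']
    by_cases hpd : k.minFac ∣ k / k.minFac
    · have hmem : k.minFac ∈ (k / k.minFac).primeFactors :=
        Nat.mem_primeFactors.mpr ⟨hprime, hpd, by omega⟩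
      rw [Finset.insert_eq_self.mpr hmem, if_pos hpd, add_zero]
    · have hnmem : k.minFac ∉ (k / k.minFac).primeFactors := by
        intro hmem
        exact hpd (Nat.mem_primeFactors.mp hmem).2.1
      rw [Finset.card_insert_of_notMem hnmem, if_neg hpd]
      push_cast
      ring

lemma pv_big_dp (k : ℕ) (h2 : 2 ≤ k) :
    pvBig k = if 1 < k / k.minFac then pvBig (k / k.minFac) else k.minFac := by
  obtain ⟨h1, hlt, hmul⟩ := pv_minFac_div_facts k h2
  have hprime := Nat.minFac_prime (by omega : k ≠ 1)
  rcases eq_or_lt_of_le h1 with hq1 | hq2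
  · have hk : k.minFac = k := by
      have h' := hmul
      rw [← hq1, one_mul] at h'
      exact h'
    have hkprime : k.Prime := hk ▸ hprime
    rw [if_neg (by omega)]
    unfold pvBig
    rw [hkprime.primeFactors, Finset.sup_singleton]
    exact hk.symm
  · have hq2' : 2 ≤ k / k.minFac := by omega
    rw [if_pos (by omega)]
    unfold pvBig
    rw [pv_primeFactors_step k h2 hq2', Finset.sup_insert]
    have hmem : (k / k.minFac).minFac ∈ (k / k.minFac).primeFactors :=
      Nat.mem_primeFactors.mpr ⟨Nat.minFac_prime (by omega), Nat.minFac_dvd _, by omega⟩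
    have hle : k.minFac ≤ (k / k.minFac).primeFactors.sup id :=
      le_trans (pv_minFac_quot_le k hq2') (Finset.le_sup (f := id) hmem)
    exact sup_eq_right.mpr hle

lemma pv_big_mem (n : ℕ) (h2 : 2 ≤ n) : pvBig n ∈ n.primeFactors := by
  have hne : n.primeFactors.Nonempty :=
    ⟨n.minFac, Nat.mem_primeFactors.mpr ⟨Nat.minFac_prime (by omega), Nat.minFac_dvd n, by omega⟩⟩
  obtain ⟨i, hi, he⟩ := Finset.exists_mem_eq_sup _ hne id
  rw [pvBig, he]
  exact hi

lemma pv_fval_eq (n : ℕ) (h2 : 2 ≤ n) :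
    pvF n = 2 * (pvOmega n : Int) - (if n < pvBig n * pvBig n then 2 else if pvBig n * pvBig n = n then 1 else 0) := by
  have hB := pv_big_mem n h2
  have hcard : 1 ≤ pvOmega n := Finset.card_pos.mpr ⟨pvBig n, hB⟩
  rw [pvF, ← Finset.add_sum_erase _ _ hB]
  have herase : ∀ p ∈ n.primeFactors.erase (pvBig n), pvContrib p n = 2 := by
    intro p hp
    obtain ⟨hne, hmem⟩ := Finset.mem_erase.mp hp
    have hple : p ≤ pvBig n := Finset.le_sup (f := id) hmem
    obtain ⟨hpp, hpd, hn0⟩ := Nat.mem_primeFactors.mp hmem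
    obtain ⟨hBp, hBd, -⟩ := Nat.mem_primeFactors.mp hB
    have hco : Nat.Coprime p (pvBig n) := (Nat.coprime_primes hpp hBp).mpr hne
    have hdvd : p * pvBig n ∣ n := hco.mul_dvd_of_dvd_of_dvd hpd hBd
    have hle : p * pvBig n ≤ n := Nat.le_of_dvd (by omega) hdvd
    have hplt : p < pvBig n := lt_of_le_of_ne hple hne
    have hlt : p * p < n := by nlinarith [hpp.two_le]
    rw [pvContrib, if_pos hlt]
  rw [Finset.sum_congr rfl herase, Finset.sum_const, Finset.card_erase_of_mem hB]
  have hcontrib : pvContrib (pvBig n) n =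
      2 - (if n < pvBig n * pvBig n then 2 else if pvBig n * pvBig n = n then 1 else 0) := by
    unfold pvContrib
    split_ifs <;> omega
  rw [hcontrib, nsmul_eq_mul]
  have hc1 : ((n.primeFactors.card - 1 : ℕ) : Int) = ((n.primeFactors.card : ℕ) : Int) - 1 := by
    have h1 : (1:ℕ) ≤ n.primeFactors.card := hcard
    omega
  rw [hc1]
  unfold pvOmega
  ring

lemma pv_floordiv_natCast (a b : ℕ) : PySem.Int.floordiv ((a:ℕ):Int) ((b:ℕ):Int) = (((a / b : ℕ)) : Int) := by
  show Int.fdiv (Int.ofNat a) (Int.ofNat b) = Int.ofNat (a / b)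
  cases a with
  | zero => simp [Int.fdiv]
  | succ n => rfl

-- the spf sieve invariant: after processing i = 2 .. k-1
lemma pvS_inner (M p : ℕ) (hpp : p.Prime) (L : List Int)
    (hL : L = (List.range (M+1)).map (fun j => if 2 ≤ j ∧ j.minFac < p then (j.minFac : Int) else 0)) :
    ((PySem.List.pyRange ((p:ℕ):Int) ((M:Int)+1) ((p:ℕ):Int)).foldl
       (fun s2 j => if PySem.List.pyGetD s2 j 0 = 0 then PySem.List.pySetD s2 j ((p:ℕ):Int) else s2) L)
    = (List.range (M+1)).map (fun j => if 2 ≤ j ∧ j.minFac < p + 1 then (j.minFac : Int) else 0) := by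
  have hp2 := hpp.two_le
  have hs : (0:Int) < ((p:ℕ):Int) := by exact_mod_cast (by omega : 0 < p)
  have hLlen : L.length = M + 1 := by rw [hL]; simp
  have hres := pv_foldl_cellwise
    (fun s2 j => if PySem.List.pyGetD s2 j 0 = 0 then PySem.List.pySetD s2 j ((p:ℕ):Int) else s2)
    (fun _ a => if a = 0 then ((p:ℕ):Int) else a)
    (by
      intro L' i
      dsimp only
      split
      · exact PySem.List.length_pySetD L' i _
      · rfl)
    (by
      intro L' i h0 hlt j hj
      obtain ⟨n, rfl⟩ : ∃ n : ℕ, i = (n:Int) := ⟨i.toNat, (Int.toNat_of_nonneg h0).symm⟩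
      have hn : n < L'.length := by exact_mod_cast hlt
      dsimp only
      by_cases hg : PySem.List.pyGetD L' ((n:ℕ):Int) 0 = 0
      · rw [if_pos hg, PySem.List.pyGetD_pySetD_natCast _ n j _ _ hn]
        by_cases hjn : j = n
        · rw [if_pos hjn, if_pos (by exact_mod_cast hjn), if_pos (by rw [hjn]; exact hg)]
        · rw [if_neg hjn, if_neg (by exact_mod_cast hjn)]
      · rw [if_neg hg]
        by_cases hjn : j = n
        · rw [if_pos (by exact_mod_cast hjn), if_neg (by rw [hjn]; exact hg)]
        · rw [if_neg (by exact_mod_cast hjn)])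
    (PySem.List.pyRange ((p:ℕ):Int) ((M:Int)+1) ((p:ℕ):Int))
    (pv_nodup_pyRange_pos _ _ _ hs) L
    (by
      intro i hi
      rw [PySem.List.mem_pyRange_iff_of_pos hs] at hi
      obtain ⟨h1, h2, -⟩ := hi
      constructor
      · omega
      · rw [hLlen]; push_cast; omega)
  obtain ⟨hlen, hpt⟩ := hres
  apply pv_eq_map_range _ M _ (by rw [hlen, hLlen])
  intro j hj
  rw [hpt j (by omega)]
  have hmem : ((j:Int) ∈ PySem.List.pyRange ((p:ℕ):Int) ((M:Int)+1) ((p:ℕ):Int)) ↔ (p ∣ j ∧ p ≤ j) := by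
    rw [PySem.List.mem_pyRange_iff_of_pos hs]
    constructor
    · rintro ⟨h1, -, h3⟩
      have h4 : ((p:ℕ):Int) ∣ (j:Int) := by
        have := dvd_add h3 (dvd_refl ((p:ℕ):Int))
        simpa using this
      exact ⟨by exact_mod_cast h4, by exact_mod_cast h1⟩
    · rintro ⟨h1, h2⟩
      refine ⟨by exact_mod_cast h2, by omega, ?_⟩
      exact dvd_sub (by exact_mod_cast h1) (dvd_refl _)
  have hold : PySem.List.pyGetD L ((j:ℕ):Int) 0 = (if 2 ≤ j ∧ j.minFac < p then ((j.minFac:ℕ) : Int) else 0) := by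
    rw [hL, PySem.List.pyGetD_natCast, PySem.List.getD_map_range _ _ _ _ (by omega)]
  rw [hold]
  by_cases hj2 : 2 ≤ j
  · have hmf2 := (Nat.minFac_prime (by omega : j ≠ 1)).two_le
    rcases lt_trichotomy j.minFac p with hc | hc | hc
    · -- already set: value is nonzero, nothing changes
      by_cases hm : (j:Int) ∈ PySem.List.pyRange ((p:ℕ):Int) ((M:Int)+1) ((p:ℕ):Int)
      · rw [if_pos hm]
        show (if (if 2 ≤ j ∧ j.minFac < p then ((j.minFac:ℕ):Int) else 0) = 0 then ((p:ℕ):Int)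
            else (if 2 ≤ j ∧ j.minFac < p then ((j.minFac:ℕ):Int) else 0))
            = (if 2 ≤ j ∧ j.minFac < p + 1 then ((j.minFac:ℕ):Int) else 0)
        rw [if_pos (show 2 ≤ j ∧ j.minFac < p from ⟨hj2, hc⟩),
          if_neg (show ¬ ((j.minFac:ℕ):Int) = 0 from by exact_mod_cast (by omega : ¬ (j.minFac:ℕ) = 0)),
          if_pos (show 2 ≤ j ∧ j.minFac < p + 1 from ⟨hj2, by omega⟩)]
      · rw [if_neg hm, if_pos (show 2 ≤ j ∧ j.minFac < p from ⟨hj2, hc⟩),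
          if_pos (show 2 ≤ j ∧ j.minFac < p + 1 from ⟨hj2, by omega⟩)]
    · -- minFac j = p: this pass writes p
      have hdvd : p ∣ j := hc ▸ Nat.minFac_dvd j
      have hple : p ≤ j := Nat.le_of_dvd (by omega) hdvd
      have hm : ((j:Int) ∈ PySem.List.pyRange ((p:ℕ):Int) ((M:Int)+1) ((p:ℕ):Int)) :=
        hmem.mpr (And.intro hdvd hple)
      rw [if_pos hm]
      show (if (if 2 ≤ j ∧ j.minFac < p then ((j.minFac:ℕ):Int) else 0) = 0 then ((p:ℕ):Int)
          else (if 2 ≤ j ∧ j.minFac < p then ((j.minFac:ℕ):Int) else 0))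
          = (if 2 ≤ j ∧ j.minFac < p + 1 then ((j.minFac:ℕ):Int) else 0)
      rw [if_neg (show ¬ (2 ≤ j ∧ j.minFac < p) from by rintro ⟨-, h⟩; omega), if_pos rfl,
        if_pos (show 2 ≤ j ∧ j.minFac < p + 1 from ⟨hj2, by omega⟩), hc]
    · -- minFac j > p: p does not divide j, cell untouched and still 0
      have hndvd : ¬ p ∣ j := by
        intro hdvd
        have := Nat.minFac_le_of_dvd hp2 hdvd
        omega
      rw [if_neg (by rw [hmem]; tauto), if_neg (by rintro ⟨-, h⟩; omega),
        if_neg (by rintro ⟨-, h⟩; omega)]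
  · -- j < 2: not a multiple of p ≥ 2 within the range
    have hnm : ¬ ((j:Int) ∈ PySem.List.pyRange ((p:ℕ):Int) ((M:Int)+1) ((p:ℕ):Int)) := by
      rw [hmem]
      rintro ⟨-, hple⟩
      omega
    rw [if_neg hnm, if_neg (by tauto), if_neg (by tauto)]

lemma pvS_loop (M : ℕ) (k : ℕ) (h2 : 2 ≤ k) (hkb : k ≤ M + 1) :
    (PySem.List.pyRange 2 ((k:ℕ) : Int)).foldl (pvStepS (M : Int)) (List.replicate (M + 1) (0:Int)) =
      (List.range (M + 1)).map (fun j => if 2 ≤ j ∧ j.minFac < k then (j.minFac : Int) else 0) := by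
  induction k, h2 using Nat.le_induction with
  | base =>
    rw [show (((2:ℕ)) : Int) = 2 by norm_num, PySem.List.pyRange_one_eq_nil le_rfl]
    simp only [List.foldl_nil]
    apply List.ext_getElem (by simp)
    intro i h1' h2'
    have hni : ¬ (2 ≤ i ∧ i.minFac < 2) := by
      rintro ⟨hi2, hlt⟩
      have := (Nat.minFac_prime (by omega : i ≠ 1)).two_le
      omega
    simp only [List.getElem_replicate, List.getElem_map, List.getElem_range, if_neg hni]
  | succ k hk2 ih =>
    have hkM : k ≤ M := by omega
    have hcast : (((k+1:ℕ)) : Int) = ((k:ℕ):Int) + 1 := by push_cast; ring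
    rw [hcast, PySem.List.pyRange_one_succ_right (by exact_mod_cast hk2 : (2:Int) ≤ ((k:ℕ):Int)),
      List.foldl_append, ih (by omega)]
    simp only [List.foldl_cons, List.foldl_nil]
    have hguard : PySem.List.pyGetD ((List.range (M + 1)).map
        (fun j => if 2 ≤ j ∧ j.minFac < k then (j.minFac : Int) else 0)) ((k:ℕ):Int) 0 =
        (if 2 ≤ k ∧ k.minFac < k then (k.minFac : Int) else 0) := by
      rw [PySem.List.pyGetD_natCast, PySem.List.getD_map_range _ _ _ _ (by omega)]
    by_cases hkp : k.Prime
    · -- k prime: spf[k] is still 0, run the marking pass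
      unfold pvStepS
      rw [hguard, if_neg (show ¬ (2 ≤ k ∧ k.minFac < k) from by
        rintro ⟨-, hlt⟩
        rw [(Nat.prime_def_minFac.mp hkp).2] at hlt
        omega), if_pos rfl]
      exact pvS_inner M k hkp _ rfl
    · -- k composite: spf[k] was already written by its minimal factor
      have hmf2 := (Nat.minFac_prime (by omega : k ≠ 1)).two_le
      have hlt : k.minFac < k := by
        have hle := Nat.minFac_le (by omega : 0 < k)
        rcases lt_or_eq_of_le hle with h' | h'
        · exact h'
        · exact absurd (Nat.prime_def_minFac.mpr ⟨hk2, h'⟩) hkp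
      unfold pvStepS
      rw [hguard, if_pos (show 2 ≤ k ∧ k.minFac < k from ⟨hk2, hlt⟩),
        if_neg (show ¬ ((k.minFac:ℕ):Int) = 0 from by exact_mod_cast (by omega : ¬ (k.minFac:ℕ) = 0))]
      apply List.map_congr_left
      intro j _
      by_cases hj2 : 2 ≤ j
      · have : j.minFac ≠ k := by
          intro he
          exact hkp (he ▸ Nat.minFac_prime (by omega : j ≠ 1))
        by_cases hc : j.minFac < k
        · rw [if_pos ⟨hj2, hc⟩, if_pos ⟨hj2, by omega⟩]
        · rw [if_neg (by tauto), if_neg (by rintro ⟨-, h⟩; omega)]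
      · rw [if_neg (by tauto), if_neg (by tauto)]

lemma pv_set_map_range_step (M k : ℕ) (_hk : k < M + 1) (F : ℕ → Int) :
    PySem.List.pySetD ((List.range (M+1)).map (fun j => if j < k then F j else 0)) ((k:ℕ):Int) (F k) =
      (List.range (M+1)).map (fun j => if j < k + 1 then F j else 0) := by
  rw [PySem.List.pySetD_natCast]
  apply List.ext_getElem (by simp)
  intro i h1 h2
  rw [List.getElem_set]
  simp only [List.getElem_map, List.getElem_range]
  by_cases hik : k = i
  · rw [if_pos hik, if_pos (by omega), hik]
  · rw [if_neg hik]
    by_cases h3 : i < k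
    · rw [if_pos h3, if_pos (by omega)]
    · rw [if_neg h3, if_neg (by omega)]

lemma pvT_loop (M : ℕ) (k : ℕ) (h2 : 2 ≤ k) (hkb : k ≤ M + 1) :
    (PySem.List.pyRange 2 ((k:ℕ) : Int)).foldl
      (pvStepT ((List.range (M+1)).map (fun j => if 2 ≤ j ∧ j.minFac < M + 1 then (j.minFac : Int) else 0)))
      (List.replicate (M + 1) (0:Int), List.replicate (M + 1) (0:Int), List.replicate (M + 1) (0:Int)) =
      ((List.range (M+1)).map (fun j => if j < k then (pvOmega j : Int) else 0),
       (List.range (M+1)).map (fun j => if j < k then (pvBig j : Int) else 0),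
       (List.range (M+1)).map (fun j => if j < k then pvF j else 0)) := by
  induction k, h2 using Nat.le_induction with
  | base =>
    rw [show (((2:ℕ)) : Int) = 2 by norm_num, PySem.List.pyRange_one_eq_nil le_rfl]
    simp only [List.foldl_nil, Prod.mk.injEq]
    refine ⟨?_, ?_, ?_⟩ <;>
    · apply List.ext_getElem (by simp)
      intro i h1' h2'
      simp only [List.getElem_replicate, List.getElem_map, List.getElem_range]
      by_cases hi : i < 2
      · obtain ⟨ho, hb, hf⟩ := pv_small_vals i hi
        rw [if_pos hi]
        simp [ho, hb, hf]
      · rw [if_neg hi]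
  | succ k hk2 ih =>
    have hkM : k ≤ M := by omega
    have hcast : (((k+1:ℕ)) : Int) = ((k:ℕ):Int) + 1 := by push_cast; ring
    rw [hcast, PySem.List.pyRange_one_succ_right (by exact_mod_cast hk2 : (2:Int) ≤ ((k:ℕ):Int)),
      List.foldl_append, ih (by omega)]
    simp only [List.foldl_cons, List.foldl_nil]
    simp only [pvStepT]
    have hmfle : k.minFac ≤ k := Nat.minFac_le (by omega)
    have hmf2 : 2 ≤ k.minFac := (Nat.minFac_prime (by omega : k ≠ 1)).two_le
    obtain ⟨hq1, hqlt, hqmul⟩ := pv_minFac_div_facts k (by omega)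
    have hspfk : PySem.List.pyGetD ((List.range (M+1)).map
        (fun j => if 2 ≤ j ∧ j.minFac < M + 1 then (j.minFac : Int) else 0)) ((k:ℕ):Int) 0 =
        ((k.minFac:ℕ) : Int) := by
      rw [PySem.List.pyGetD_natCast, PySem.List.getD_map_range _ _ _ _ (by omega),
        if_pos ⟨hk2, by omega⟩]
    rw [hspfk, pv_floordiv_natCast k k.minFac]
    have hqM : k / k.minFac < M + 1 := by omega
    have homega_read : PySem.List.pyGetD ((List.range (M+1)).map
        (fun j => if j < k then (pvOmega j : Int) else 0)) (((k / k.minFac : ℕ)):Int) 0 =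
        ((pvOmega (k / k.minFac) : ℕ) : Int) := by
      rw [PySem.List.pyGetD_natCast, PySem.List.getD_map_range _ _ _ _ (by omega), if_pos (by omega)]
    have hbig_read : PySem.List.pyGetD ((List.range (M+1)).map
        (fun j => if j < k then (pvBig j : Int) else 0)) (((k / k.minFac : ℕ)):Int) 0 =
        ((pvBig (k / k.minFac) : ℕ) : Int) := by
      rw [PySem.List.pyGetD_natCast, PySem.List.getD_map_range _ _ _ _ (by omega), if_pos (by omega)]
    have hspfq : PySem.List.pyGetD ((List.range (M+1)).map
        (fun j => if 2 ≤ j ∧ j.minFac < M + 1 then (j.minFac : Int) else 0)) (((k / k.minFac : ℕ)):Int) 0 =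
        (if 2 ≤ k / k.minFac then ((k / k.minFac).minFac : Int) else 0) := by
      rw [PySem.List.pyGetD_natCast, PySem.List.getD_map_range _ _ _ _ (by omega)]
      by_cases hq2 : 2 ≤ k / k.minFac
      · have := Nat.minFac_le (by omega : 0 < k / k.minFac)
        rw [if_pos ⟨hq2, by omega⟩, if_pos hq2]
      · rw [if_neg (by tauto), if_neg hq2]
    rw [homega_read, hbig_read, hspfq]
    have homval : ((pvOmega (k / k.minFac) : ℕ) : Int) +
        (if (if 2 ≤ k / k.minFac then ((k / k.minFac).minFac : Int) else 0) = ((k.minFac:ℕ):Int) then 0 else 1) =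
        ((pvOmega k : ℕ) : Int) := by
      rw [pv_omega_dp k (by omega)]
      congr 1
      by_cases hq2 : 2 ≤ k / k.minFac
      · rw [if_pos hq2]
        have hiff : (((k / k.minFac).minFac : Int) = ((k.minFac:ℕ):Int)) ↔ (k.minFac ∣ k / k.minFac) := by
          rw [show (((k / k.minFac).minFac : Int) = ((k.minFac:ℕ):Int)) ↔ ((k / k.minFac).minFac = k.minFac) from
            by constructor <;> intro h <;> exact_mod_cast h]
          exact pv_minFac_quot_eq k (by omega) hq2
        rw [if_congr hiff rfl rfl]
      · have hqeq : k / k.minFac = 1 := by omega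
        rw [if_neg hq2, if_neg (show ¬ (0:Int) = ((k.minFac:ℕ):Int) from by
            intro h
            have : (k.minFac:ℕ) = 0 := by exact_mod_cast h.symm
            omega),
          if_neg (show ¬ k.minFac ∣ k / k.minFac from by
            rw [hqeq]
            intro h
            have := Nat.dvd_one.mp h
            omega)]
    rw [homval]
    have hbgval : (if (1:Int) < (((k / k.minFac : ℕ)):Int) then ((pvBig (k / k.minFac) : ℕ) : Int)
        else ((k.minFac:ℕ):Int)) = ((pvBig k : ℕ) : Int) := by
      rw [pv_big_dp k (by omega)]
      by_cases hq2 : 1 < k / k.minFac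
      · rw [if_pos (by exact_mod_cast hq2), if_pos hq2]
      · rw [if_neg (by exact_mod_cast hq2), if_neg hq2]
    rw [hbgval]
    have hrval : 2 * ((pvOmega k : ℕ) : Int) -
        (if ((k:ℕ):Int) < ((pvBig k : ℕ) : Int) * ((pvBig k : ℕ) : Int) then 2
         else if ((pvBig k : ℕ) : Int) * ((pvBig k : ℕ) : Int) = ((k:ℕ):Int) then 1 else 0) = pvF k := by
      have h1 : (((k:ℕ):Int) < ((pvBig k : ℕ) : Int) * ((pvBig k : ℕ) : Int)) ↔ k < pvBig k * pvBig k := by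
        constructor <;> intro h <;> exact_mod_cast h
      have h2 : (((pvBig k : ℕ) : Int) * ((pvBig k : ℕ) : Int) = ((k:ℕ):Int)) ↔ pvBig k * pvBig k = k := by
        constructor <;> intro h <;> exact_mod_cast h
      rw [pv_fval_eq k (by omega), if_congr h1 rfl (if_congr h2 rfl rfl)]
    rw [hrval]
    simp only [Prod.mk.injEq]
    refine ⟨?_, ?_, ?_⟩
    · exact pv_set_map_range_step M k (by omega) (fun j => ((pvOmega j : ℕ) : Int))
    · exact pv_set_map_range_step M k (by omega) (fun j => ((pvBig j : ℕ) : Int))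
    · exact pv_set_map_range_step M k (by omega) pvF

lemma pvB_eval (M : ℕ) (hM : 2 ≤ M) :
    get_divisor_counts_alt ((M:ℕ):Int) = (List.range (M+1)).map pvF := by
  unfold get_divisor_counts_alt
  rw [if_neg (by omega)]
  show ((PySem.List.pyRange 2 (((M:ℕ):Int) + 1)).foldl
      (pvStepT ((PySem.List.pyRange 2 (((M:ℕ):Int) + 1)).foldl (pvStepS ((M:ℕ):Int))
        (List.replicate ((((M:ℕ):Int) + 1)).toNat 0)))
      (List.replicate ((((M:ℕ):Int) + 1)).toNat 0, List.replicate ((((M:ℕ):Int) + 1)).toNat 0,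
        List.replicate ((((M:ℕ):Int) + 1)).toNat 0)).2.2 = (List.range (M+1)).map pvF
  rw [show ((((M:ℕ):Int)) + 1).toNat = M + 1 from by omega,
    show (((M:ℕ):Int) + 1) = (((M+1:ℕ)) : Int) from by push_cast; ring,
    pvS_loop M (M+1) (by omega) le_rfl,
    pvT_loop M (M+1) (by omega) le_rfl]
  show (List.range (M+1)).map (fun j => if j < M + 1 then pvF j else 0) = (List.range (M+1)).map pvF
  apply List.map_congr_left
  intro a ha
  rw [if_pos (List.mem_range.mp ha)]

theorem get_divisor_counts_spec : Claim_equal_get_divisor_counts := by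
  unfold Claim_equal_get_divisor_counts Spec_get_divisor_counts
  intro N _
  by_cases hN : N < 2
  · unfold get_divisor_counts get_divisor_counts_alt
    rw [if_pos hN, if_pos hN]
  · have h0 : 0 ≤ N := by omega
    obtain ⟨M, rfl⟩ : ∃ M : ℕ, N = ((M:ℕ):Int) := ⟨N.toNat, (Int.toNat_of_nonneg h0).symm⟩
    have hM : 2 ≤ M := by exact_mod_cast not_lt.mp hN
    rw [pvA_eval M hM, pvB_eval M hM]
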